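-- pv_equiv track=rewrite | github.com/saroandev/karararama-service-knowledgebase | app/core/chunking/utils.py | split_by_separator
-- ===== SOURCE A (Python) =====
-- from typing import List, Dict, Any, Tuple
--
-- def split_by_separator(
--     text: str,
--     separators: List[str] = None
-- ) -> List[str]:
--     """
--     Split text by hierarchical separators
--
--     Args:
--         text: Text to split
--         separators: List of separators in order of preference
--
--     Returns:
--         List of text segments
--     """
--     if separators is None:
--         separators = ["\n\n", "\n", ". ", " ", ""]
--
--     segments = [text]
--
--     for separator in separators:
--         if not separator:
--             continue
--
--         new_segments = []
--         for segment in segments: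
--             if separator in segment:
--                 parts = segment.split(separator)
--                 # Keep separator with the part
--                 for i, part in enumerate(parts[:-1]):
--                     new_segments.append(part + separator)
--                 new_segments.append(parts[-1])
--             else:
--                 new_segments.append(segment)
--
--         segments = new_segments
--
--     return [s for s in segments if s.strip()]
-- ===== SOURCE B (Python) =====
-- def split_by_separator(text, separators=None):
--     if separators is None:
--         separators = ["\n\n", "\n", ". ", " ", ""]
--
--     def go(t, seps):
--         # recursive descent over the separator hierarchy (depth = len(seps))
--         if not seps:
--             return [t]
--         sep, rest = seps[0], seps[1:]
--         if not sep:
--             return go(t, rest)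
--         parts = t.split(sep)
--         pieces = [p + sep for p in parts[:-1]] + [parts[-1]]
--         return [x for p in pieces for x in go(p, rest)]
--
--     return [s for s in go(text, separators) if s.strip()]
-- ===== Notes on version B (the rewrite author's own statement) =====
-- stated objective: alternative
-- what changed: Replaces A's iterative passes (one pass per separator over the whole evolving segment list, with a membership pre-check before each split) by a recursive helper that descends the separator hierarchy: it splits the text by the first separator, re-attaches it to all but the last piece, and recurses on each piece with the remaining separators, filtering blanks once at the top (B is not faster; it recurses, so separator lists with ~1000+ entries can exceed Python's recursion limit).
import Mathlib
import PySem

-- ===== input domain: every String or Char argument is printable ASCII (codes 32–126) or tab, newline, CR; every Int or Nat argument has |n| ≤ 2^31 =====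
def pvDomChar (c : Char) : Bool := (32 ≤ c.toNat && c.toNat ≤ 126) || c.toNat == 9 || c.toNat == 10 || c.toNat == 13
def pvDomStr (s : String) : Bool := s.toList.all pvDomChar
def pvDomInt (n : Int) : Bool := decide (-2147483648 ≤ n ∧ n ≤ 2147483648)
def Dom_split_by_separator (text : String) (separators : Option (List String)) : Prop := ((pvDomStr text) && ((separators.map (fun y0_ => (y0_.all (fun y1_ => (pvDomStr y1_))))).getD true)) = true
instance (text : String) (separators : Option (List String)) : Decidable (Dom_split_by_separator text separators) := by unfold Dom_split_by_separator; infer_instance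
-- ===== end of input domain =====

-- B replaces A's iterative per-separator passes over the whole segment list by a recursive
-- descent of the separator hierarchy (split, re-attach, recurse on each piece); return value
-- only; Python B can hit the interpreter recursion limit on ~1000+ separators.


-- ===== PORT A =====
-- literal transliteration of A: outer loop over separators, inner loop rebuilding the
-- segment list; 'parts' is nonempty whenever the split happens, so the '.getD ""' defaults
-- on split?/getLastD never fire (sep ≠ "" in that branch, split gives ≥ 1 piece).
def split_by_separator (text : String) (separators : Option (List String)) : List String :=
  (((separators.getD ["\n\n", "\n", ". ", " ", ""]).foldl (fun segments separator =>
      if separator = "" then segments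
      else
        segments.foldl (fun new_segments segment =>
          if PySem.Str.isIn separator segment then
            new_segments
              ++ (PySem.List.slice ((PySem.Str.split? segment separator).getD []) none (some (-1))).map
                  (fun part => part ++ separator)
              ++ [((PySem.Str.split? segment separator).getD []).getLastD ""]
          else new_segments ++ [segment]) []) [text])).filter (fun s => PySem.Str.strip s != "")

-- ===== PORT B =====
-- literal transliteration of B's recursive helper 'go'
def sbs_go : String → List String → List String
  | t, [] => [t]
  | t, sep :: rest =>
    if sep = "" then sbs_go t rest
    else
      (((PySem.Str.split? t sep).getD []).dropLast.map (fun p => p ++ sep)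
        ++ [((PySem.Str.split? t sep).getD []).getLastD ""]).flatMap (fun p => sbs_go p rest)

def split_by_separator_alt (text : String) (separators : Option (List String)) : List String :=
  (sbs_go text (separators.getD ["\n\n", "\n", ". ", " ", ""])).filter (fun s => PySem.Str.strip s != "")

-- ===== PRECONDITION & SPEC =====
def Spec_split_by_separator (text : String) (separators : Option (List String)) (out : List String) : Prop := out = split_by_separator_alt text separators
instance (text : String) (separators : Option (List String)) (out : List String) : Decidable (Spec_split_by_separator text separators out) := by unfold Spec_split_by_separator; infer_instance

-- ===== CLAIM (what is proved, stated in full; the proofs are below) =====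
def Claim_equal_split_by_separator : Prop := ∀ (text : String) (separators : Option (List String)), Dom_split_by_separator text separators → Spec_split_by_separator text separators (split_by_separator text separators)

-- ===== LEMMAS AND PROOFS =====

-- A's per-segment action in one pass with separator sep
def sbsStep (sep seg : String) : List String :=
  if PySem.Str.isIn sep seg then
    (PySem.List.slice ((PySem.Str.split? seg sep).getD []) none (some (-1))).map (fun part => part ++ sep)
      ++ [((PySem.Str.split? seg sep).getD []).getLastD ""]
  else [seg]

-- splitOn.go walks the string without ever cutting when sep occurs nowhere in l
theorem sbs_go_const (sep : List Char) (l : List Char) : ∀ (fuel : Nat) (cur : List Char)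
    (acc : List (List Char)), ¬ sep <:+: l →
    PySem.Chars.splitOn.go sep fuel l cur acc = ((cur.reverse ++ l) :: acc).reverse := by
  induction l with
  | nil =>
    intro fuel cur acc _
    cases fuel <;> simp [PySem.Chars.splitOn.go]
  | cons c rest ih =>
    intro fuel cur acc h
    cases fuel with
    | zero => simp [PySem.Chars.splitOn.go]
    | succ fuel =>
      have hpre : sep.isPrefixOf (c :: rest) = false := by
        by_contra hx
        exact h ((List.isPrefixOf_iff_prefix.mp (by simpa using hx)).isInfix)
      have hrest : ¬ sep <:+: rest := fun hx => h (hx.trans (List.suffix_cons c rest).isInfix)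
      rw [PySem.Chars.splitOn.go]
      simp only [hpre, Bool.false_eq_true, if_false]
      rw [ih fuel (c :: cur) acc hrest]
      simp

theorem splitOn_of_not_infix (l sep : List Char) (h : ¬ sep <:+: l) :
    PySem.Chars.splitOn l sep = [l] := by
  unfold PySem.Chars.splitOn
  rw [sbs_go_const sep l _ [] [] h]
  simp

-- A's step equals B's split-and-reattach for a nonempty separator
theorem sbsStep_eq (sep t : String) (hsep : sep ≠ "") :
    sbsStep sep t =
      (((PySem.Str.split? t sep).getD []).dropLast.map (fun p => p ++ sep)
        ++ [((PySem.Str.split? t sep).getD []).getLastD ""]) := by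
  unfold sbsStep
  by_cases h : PySem.Str.isIn sep t = true
  · rw [if_pos h, PySem.List.slice_to_neg_one]
  · have hni : ¬ sep.toList <:+: t.toList := by
      have := (PySem.Chars.isIn_eq_false_iff sep.toList t.toList).mp
      exact this (by simpa [PySem.Str.isIn] using (Bool.eq_false_iff.mpr h))
    have hsplit : PySem.Str.split? t sep = some [t] := by
      unfold PySem.Str.split?
      unfold PySem.Chars.split?
      have : sep.toList.isEmpty = false := by
        cases hsl : sep.toList with
        | nil => exact absurd (String.toList_eq_nil_iff.mp hsl) hsep
        | cons a as => simp
      rw [this]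
      simp [splitOn_of_not_infix t.toList sep.toList hni]
    rw [if_neg h, hsplit]
    simp

theorem sbs_go_empty_sep (t : String) (rest : List String) :
    sbs_go t ("" :: rest) = sbs_go t rest := by
  simp [sbs_go]

theorem sbs_go_cons (t sep : String) (rest : List String) (hsep : sep ≠ "") :
    sbs_go t (sep :: rest) = (sbsStep sep t).flatMap (fun p => sbs_go p rest) := by
  rw [sbsStep_eq sep t hsep]
  simp only [sbs_go, if_neg hsep]

-- A's inner pass over segments is a flatMap of sbsStep
theorem pass_eq_flatMap (sep : String) (segs : List String) :
    segs.foldl (fun new_segments segment =>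
      if PySem.Str.isIn sep segment then
        let parts := (PySem.Str.split? segment sep).getD []
        new_segments ++ (PySem.List.slice parts none (some (-1))).map (fun part => part ++ sep)
          ++ [parts.getLastD ""]
      else new_segments ++ [segment]) [] = segs.flatMap (sbsStep sep) := by
  have hfun : (fun (new_segments : List String) (segment : String) =>
      if PySem.Str.isIn sep segment then
        new_segments
          ++ (PySem.List.slice ((PySem.Str.split? segment sep).getD []) none (some (-1))).map
              (fun part => part ++ sep)
          ++ [((PySem.Str.split? segment sep).getD []).getLastD ""]
      else new_segments ++ [segment]) =
      (fun new_segments segment => new_segments ++ sbsStep sep segment) := by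
    funext ns seg
    unfold sbsStep
    split <;> simp
  rw [hfun, PySem.List.foldl_append_eq_flatMap]
  simp

-- main invariant: A's remaining passes over a segment list = flatMap of B's recursion
theorem sbs_main (seps : List String) : ∀ (segs : List String),
    seps.foldl (fun segments separator =>
      if separator = "" then segments
      else
        segments.foldl (fun new_segments segment =>
          if PySem.Str.isIn separator segment then
            new_segments
              ++ (PySem.List.slice ((PySem.Str.split? segment separator).getD []) none (some (-1))).map
                  (fun part => part ++ separator)
              ++ [((PySem.Str.split? segment separator).getD []).getLastD ""]
          else new_segments ++ [segment]) []) segs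
      = segs.flatMap (fun t => sbs_go t seps) := by
  induction seps with
  | nil => intro segs; simp [sbs_go]
  | cons sep rest ih =>
    intro segs
    by_cases hsep : sep = ""
    · subst hsep
      rw [List.foldl_cons, if_pos rfl, ih]
      exact List.flatMap_congr (fun t _ => (sbs_go_empty_sep t rest).symm)
    · simp only [List.foldl_cons, if_neg hsep]
      rw [pass_eq_flatMap, ih, List.flatMap_assoc]
      refine List.flatMap_congr (fun t _ => ?_)
      rw [sbs_go_cons t sep rest hsep]

-- ===== VERDICT (by name: the statement is the Claim_ definition above) =====
theorem split_by_separator_spec : Claim_equal_split_by_separator := by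
  intro text separators _
  unfold Spec_split_by_separator split_by_separator split_by_separator_alt
  rw [sbs_main]
  simp
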